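-- pv_equiv track=rewrite | github.com/tristanbudd/university-cw | Data Structures Practicals/src/dsa_pract7/__init__.py | modulo_hashing
-- ===== SOURCE A (Python) =====
-- def modulo_hashing(keys, m):
--     hash_table = [0] * m
--     collisions = 0
--     for key in keys:
--         h = key % m
--         if hash_table[h] != 0:
--             collisions += 1
--         hash_table[h] += 1
--     return hash_table, collisions
-- ===== SOURCE B (Python) =====
-- def modulo_hashing(keys, m):
--     # sort the bucket indices, then scan runs of equal values:
--     # each run of length r fills one table slot and contributes r-1 collisions
--     buckets = sorted(key % m for key in keys)
--     hash_table = [0] * m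
--     collisions = 0
--     while buckets:
--         b = buckets[0]
--         run = 1
--         while run < len(buckets) and buckets[run] == b:
--             run += 1
--         hash_table[b] = run
--         collisions += run - 1
--         buckets = buckets[run:]
--     return hash_table, collisions
-- ===== Notes on version B (the rewrite author's own statement) =====
-- stated objective: alternative
-- what changed: B sorts the bucket indices and then scans runs of equal values (each run of length r fills one table slot with r and adds r-1 collisions), replacing A's fused pass that mutates a preallocated table and tests occupancy per key.
import Mathlib
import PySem

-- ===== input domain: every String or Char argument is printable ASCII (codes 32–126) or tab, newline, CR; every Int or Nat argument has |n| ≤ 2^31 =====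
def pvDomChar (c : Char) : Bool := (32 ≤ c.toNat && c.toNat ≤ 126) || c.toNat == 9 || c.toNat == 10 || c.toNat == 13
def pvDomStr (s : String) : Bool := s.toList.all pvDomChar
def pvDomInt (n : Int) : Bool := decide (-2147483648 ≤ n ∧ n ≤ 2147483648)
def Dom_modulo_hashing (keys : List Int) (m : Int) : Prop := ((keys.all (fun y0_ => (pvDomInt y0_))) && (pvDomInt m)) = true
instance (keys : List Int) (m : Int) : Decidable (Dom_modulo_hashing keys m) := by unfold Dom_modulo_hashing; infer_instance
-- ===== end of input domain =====

-- B sorts the bucket indices and scans runs of equal values (run of length r fills one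
-- slot with r and adds r-1 collisions) instead of A's fused table-mutating pass; alternative algorithm.

-- ===== PORT A =====
-- the for-loop of A: state (hash_table, collisions); reads/writes via the total indexed
-- forms pyGetD/pySetD, exact under Pre_ (index key % m is then in range)
def pvALoop (ks : List Int) (m : Int) (t : List Int) (c : Int) : List Int × Int :=
  match ks with
  | [] => (t, c)
  | k :: ks =>
    let h := PySem.Int.mod k m
    let c' := if PySem.List.pyGetD t h 0 ≠ 0 then c + 1 else c
    pvALoop ks m (PySem.List.pySetD t h (PySem.List.pyGetD t h 0 + 1)) c'

def modulo_hashing (keys : List Int) (m : Int) : List Int × Int :=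
  pvALoop keys m (List.replicate m.toNat 0) 0

-- ===== PORT B =====
-- the outer while of B: pop the leading run of equal values (inner while = takeWhile),
-- write its length into the table, advance the collision count, continue on the remainder
def pvRuns (buckets : List Int) (t : List Int) (c : Int) : List Int × Int :=
  match buckets with
  | [] => (t, c)
  | b :: rest =>
    let run : Int := 1 + ((rest.takeWhile (fun x => x == b)).length : Int)
    pvRuns (rest.dropWhile (fun x => x == b)) (PySem.List.pySetD t b run) (c + run - 1)
termination_by buckets.length
decreasing_by
  simp only [List.length_cons]
  exact Nat.lt_succ_of_le (List.Sublist.length_le (List.dropWhile_sublist _))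

def modulo_hashing_alt (keys : List Int) (m : Int) : List Int × Int :=
  let buckets := PySem.List.sorted (keys.map (fun key => PySem.Int.mod key m)) (fun x => x) false
  pvRuns buckets (List.replicate m.toNat 0) 0

-- ===== PRECONDITION & SPEC =====
-- Pre_ excludes exactly the inputs where A raises: with nonempty keys, m = 0 gives
-- ZeroDivisionError and m < 0 gives IndexError ([0]*m is empty); A returns everywhere else.
def Pre_modulo_hashing (keys : List Int) (m : Int) : Prop := keys = [] ∨ 1 ≤ m
instance (keys : List Int) (m : Int) : Decidable (Pre_modulo_hashing keys m) := by unfold Pre_modulo_hashing; infer_instance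
def pvWitness_modulo_hashing : List Int × Int := ([3, 7, 11, 4], 4)

def Spec_modulo_hashing (keys : List Int) (m : Int) (out : List Int × Int) : Prop := out = modulo_hashing_alt keys m
instance (keys : List Int) (m : Int) (out : List Int × Int) : Decidable (Spec_modulo_hashing keys m out) := by unfold Spec_modulo_hashing; infer_instance

-- ===== CLAIM (what is proved, stated in full; the proofs are below) =====
def Claim_equal_modulo_hashing : Prop := ∀ (keys : List Int) (m : Int), Dom_modulo_hashing keys m → Pre_modulo_hashing keys m → Spec_modulo_hashing keys m (modulo_hashing keys m)

-- ===== LEMMAS AND PROOFS =====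

-- setting index h of a range-map is a range-map of the pointwise-updated function
lemma pvSet_map_pyRange (m h v : Int) (f g : Int → Int) (h0 : 0 ≤ h)
    (hfg : ∀ i, g i = if i = h then v else f i) :
    ((PySem.List.pyRange 0 m 1).map f).set h.toNat v = (PySem.List.pyRange 0 m 1).map g := by
  apply List.ext_getElem
  · rw [List.length_set, List.length_map, List.length_map]
  · intro j hj hj'
    rw [List.length_map] at hj'
    rw [List.getElem_set, List.getElem_map, List.getElem_map]
    have hje : (PySem.List.pyRange 0 m 1)[j] = (j : Int) := by
      rw [PySem.List.getElem_pyRange_one]; ring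
    rw [hje, hfg]
    by_cases hjh : j = h.toNat
    · have hji : (j : Int) = h := by omega
      rw [if_pos hjh.symm, if_pos hji]
    · have hji : (j : Int) ≠ h := by omega
      rw [if_neg (fun he => hjh he.symm), if_neg hji]

-- A-side invariant: the fused loop, started from the count-table of already-processed
-- buckets p, ends at the count-table of p ++ (mods of ks) with collisions advanced by
-- (#keys processed) - (#new distinct buckets)
lemma pvALoop_eq (ks : List Int) (m : Int) (hm : 1 ≤ m) :
    ∀ (p : List Int) (c : Int),
    pvALoop ks m ((PySem.List.pyRange 0 m 1).map (fun i => (p.count i : Int))) c =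
      ((PySem.List.pyRange 0 m 1).map
         (fun i => (((p ++ ks.map (fun k => PySem.Int.mod k m)).count i : Int))),
       c + (ks.length : Int)
         - (((p ++ ks.map (fun k => PySem.Int.mod k m)).toFinset.card : Int) - (p.toFinset.card : Int))) := by
  induction ks with
  | nil => intro p c; simp [pvALoop]
  | cons k ks ih =>
    intro p c
    have h0 : 0 ≤ PySem.Int.mod k m := PySem.Int.mod_nonneg k (by omega)
    have hlt : PySem.Int.mod k m < m := PySem.Int.mod_lt k (by omega)
    set h := PySem.Int.mod k m with hh
    have hget : PySem.List.pyGetD ((PySem.List.pyRange 0 m 1).map (fun i => (p.count i : Int))) h 0 = (p.count h : Int) :=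
      PySem.List.pyGetD_map_pyRange_of_nonneg _ m h 0 h0 hlt
    have hset : PySem.List.pySetD ((PySem.List.pyRange 0 m 1).map (fun i => (p.count i : Int))) h ((p.count h : Int) + 1)
        = (PySem.List.pyRange 0 m 1).map (fun i => ((p ++ [h]).count i : Int)) := by
      rw [PySem.List.pySetD_of_nonneg _ _ h0]
      refine pvSet_map_pyRange m h _ _ _ h0 (fun i => ?_)
      rw [List.count_append, List.count_singleton]
      by_cases hih : i = h
      · subst hih; simp
      · simp [hih, beq_iff_eq]
        omega
    rw [pvALoop, hget, hset, ih (p ++ [h])]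
    have happ : (p ++ [h]) ++ ks.map (fun k => PySem.Int.mod k m)
        = p ++ (k :: ks).map (fun k => PySem.Int.mod k m) := by
      simp [hh]
    rw [happ]
    refine Prod.ext rfl ?_
    simp only [List.length_cons]
    have hcardp : ((p ++ [h]).toFinset.card : Int)
        = if (p.count h : Int) ≠ 0 then (p.toFinset.card : Int) else (p.toFinset.card : Int) + 1 := by
      have hfs : (p ++ [h]).toFinset = insert h p.toFinset := by
        ext x; simp [List.mem_toFinset, or_comm]
      rw [hfs]
      by_cases hmem : h ∈ p
      · have : (p.count h : Int) ≠ 0 := by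
          have := List.count_pos_iff.mpr hmem
          omega
        rw [if_pos this, Finset.card_insert_of_mem (List.mem_toFinset.mpr hmem)]
      · have : ¬ ((p.count h : Int) ≠ 0) := by
          have := List.count_eq_zero_of_not_mem hmem
          omega
        rw [if_neg this, Finset.card_insert_of_notMem (fun hx => hmem (List.mem_toFinset.mp hx))]
        push_cast; ring
    by_cases hc : (p.count h : Int) ≠ 0
    · rw [if_pos hc] at hcardp ⊢
      rw [hcardp]; push_cast; ring
    · rw [if_neg hc] at hcardp ⊢
      rw [hcardp]; push_cast; ring

-- [0]*m is the range-map of the empty list's counts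
lemma pvReplicate_eq (m : Int) :
    List.replicate m.toNat (0 : Int) = (PySem.List.pyRange 0 m 1).map (fun i => (([] : List Int).count i : Int)) := by
  simp only [List.count_nil, Int.natCast_zero]
  rw [List.map_const', PySem.List.length_pyRange_one]
  norm_num

-- B-side invariant: the run scan over a ≤-sorted list s, started from any range-map table,
-- overwrites exactly the slots of members of s with their multiplicities and adds
-- (#elements) - (#distinct) collisions
lemma pvRuns_eq (n : Nat) : ∀ (s : List Int), s.length ≤ n → s.Pairwise (· ≤ ·) →
    (∀ x ∈ s, 0 ≤ x) → ∀ (m : Int) (f : Int → Int) (c : Int),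
    pvRuns s ((PySem.List.pyRange 0 m 1).map f) c =
      ((PySem.List.pyRange 0 m 1).map (fun i => if i ∈ s then (s.count i : Int) else f i),
       c + (s.length : Int) - (s.toFinset.card : Int)) := by
  induction n with
  | zero =>
    intro s hs _ _ m f c
    match s with
    | [] => simp [pvRuns]
    | x :: t => simp at hs
  | succ n ih =>
    intro s hs hpw hnn m f c
    match s with
    | [] => simp [pvRuns]
    | b :: rest =>
      set tw := rest.takeWhile (fun x => x == b) with htw
      set dw := rest.dropWhile (fun x => x == b) with hdw
      have hsplit : rest = tw ++ dw := (List.takeWhile_append_dropWhile).symm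
      have htwb : ∀ x ∈ tw, x = b := by
        intro x hx
        have := List.mem_takeWhile_imp hx
        exact beq_iff_eq.mp this
      have hrestpw : rest.Pairwise (· ≤ ·) := (List.pairwise_cons.mp hpw).2
      have hble : ∀ x ∈ rest, b ≤ x := (List.pairwise_cons.mp hpw).1
      have hdwpw : dw.Pairwise (· ≤ ·) := List.Pairwise.sublist (List.dropWhile_sublist _) hrestpw
      have hbnotdw : b ∉ dw := by
        intro hb
        obtain ⟨d, dt, hhd⟩ := List.exists_cons_of_ne_nil (List.ne_nil_of_mem hb)
        have hdne' : d ≠ b := by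
          have h1 := List.head?_dropWhile_not (fun x => x == b) rest
          rw [← hdw, hhd] at h1
          simpa using h1
        have hdmem : d ∈ rest := by rw [hsplit, hhd]; simp
        have hbd : b ≤ d := hble d hdmem
        have hpwdt := hdwpw
        rw [hhd] at hb hpwdt
        rcases List.mem_cons.mp hb with he | hbt
        · exact hdne' he.symm
        · exact hdne' (le_antisymm ((List.pairwise_cons.mp hpwdt).1 b hbt) hbd)
      have hcounttw : tw.count b = tw.length := List.count_eq_length.mpr (fun x hx => ((htwb x hx) ▸ rfl))
      have hcountb : (b :: rest).count b = 1 + tw.length := by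
        rw [List.count_cons_self, hsplit, List.count_append, hcounttw,
            List.count_eq_zero_of_not_mem hbnotdw]
        omega
      have hcountne : ∀ i, i ≠ b → (b :: rest).count i = dw.count i := by
        intro i hib
        have h1 : tw.count i = 0 := List.count_eq_zero_of_not_mem (fun hi => hib (htwb i hi))
        rw [hsplit]
        simp [List.count_append, h1, Ne.symm hib]
      have hmemne : ∀ i, i ≠ b → (i ∈ (b :: rest) ↔ i ∈ dw) := by
        intro i hib
        rw [List.mem_cons, hsplit, List.mem_append]
        constructor
        · rintro (he | hi | hi)
          · exact absurd he hib
          · exact absurd (htwb i hi) hib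
          · exact hi
        · intro hi; exact Or.inr (Or.inr hi)
      have hfinset : (b :: rest).toFinset = insert b dw.toFinset := by
        ext x
        simp only [List.mem_toFinset, Finset.mem_insert]
        by_cases hxb : x = b
        · subst hxb; simp
        · rw [hmemne x hxb]; simp [hxb]
      have hcard : (b :: rest).toFinset.card = dw.toFinset.card + 1 := by
        rw [hfinset, Finset.card_insert_of_notMem (fun hx => hbnotdw (List.mem_toFinset.mp hx))]
      have hb0 : 0 ≤ b := hnn b (List.mem_cons_self)
      have hdwlen : dw.length ≤ rest.length := List.Sublist.length_le (List.dropWhile_sublist _)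
      have hdnn : ∀ x ∈ dw, 0 ≤ x := fun x hx =>
        hnn x (List.mem_cons_of_mem b ((List.dropWhile_sublist _).mem hx))
      rw [pvRuns]
      simp only [← htw, ← hdw]
      set run : Int := 1 + (tw.length : Int) with hrun
      have hset : PySem.List.pySetD ((PySem.List.pyRange 0 m 1).map f) b run
          = (PySem.List.pyRange 0 m 1).map (fun i => if i = b then run else f i) := by
        rw [PySem.List.pySetD_of_nonneg _ _ hb0]
        exact pvSet_map_pyRange m b run f _ hb0 (fun i => rfl)
      rw [hset, ih dw (by simp at hs; omega) hdwpw hdnn m _ (c + run - 1)]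
      refine Prod.ext ?_ ?_
      · simp only
        refine List.map_congr_left (fun i _ => ?_)
        by_cases hib : i = b
        · subst hib
          rw [if_neg hbnotdw, if_pos rfl, if_pos (List.mem_cons_self), hcountb]
          push_cast [hrun]; ring
        · by_cases hidw : i ∈ dw
          · rw [if_pos hidw, if_pos ((hmemne i hib).mpr hidw), hcountne i hib]
          · rw [if_neg hidw, if_neg hib, if_neg (fun hi => hidw ((hmemne i hib).mp hi))]
      · simp only [List.length_cons, hcard]
        have hlen : rest.length = tw.length + dw.length := by
          rw [hsplit, List.length_append]
        rw [hlen]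
        push_cast [hrun]; ring

-- ===== VERDICT (by name: the statement is the Claim_ definition above) =====
theorem modulo_hashing_spec : Claim_equal_modulo_hashing := by
  intro keys m _ hpre
  unfold Spec_modulo_hashing modulo_hashing modulo_hashing_alt
  by_cases hm : 1 ≤ m
  · set bs := keys.map (fun k => PySem.Int.mod k m) with hbs
    set s := PySem.List.sorted bs (fun x => x) false with hsrt
    have hperm : s.Perm bs := PySem.List.sorted_perm bs (fun x => x) false
    have hpw : s.Pairwise (· ≤ ·) := PySem.List.sorted_pairwise bs (fun x => x)
    have hnn : ∀ x ∈ s, 0 ≤ x := by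
      intro x hx
      have hxbs : x ∈ bs := hperm.mem_iff.mp hx
      rw [hbs] at hxbs
      rcases List.mem_map.mp hxbs with ⟨k, _, hk⟩
      exact hk ▸ PySem.Int.mod_nonneg k (by omega)
    show pvALoop keys m (List.replicate m.toNat 0) 0 = pvRuns s (List.replicate m.toNat 0) 0
    rw [pvReplicate_eq m, pvALoop_eq keys m hm [] 0, pvRuns_eq s.length s le_rfl hpw hnn m _ 0,
        ← hbs]
    refine Prod.ext ?_ ?_
    · simp only [List.nil_append]
      refine List.map_congr_left (fun i _ => ?_)
      by_cases hmem : i ∈ s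
      · rw [if_pos hmem, hperm.count_eq]
      · rw [if_neg hmem,
            List.count_eq_zero_of_not_mem (fun hi => hmem (hperm.mem_iff.mpr hi))]
        simp
    · have hlen2 : s.length = keys.length := by rw [hperm.length_eq, hbs, List.length_map]
      have hfin : s.toFinset = bs.toFinset := by
        ext x; simp [List.mem_toFinset, hperm.mem_iff]
      simp only [List.nil_append, List.toFinset_nil, Finset.card_empty, hlen2, hfin]
      push_cast; ring
  · rcases hpre with hk | hk
    · subst hk
      have hsnil : PySem.List.sorted ([] : List Int) (fun x => x) false = [] := by
        simp [PySem.List.sorted_eq_nil_iff]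
      simp [pvALoop, pvRuns, hsnil]
    · omega
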